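-- pv_equiv track=rewrite | github.com/elemel/advent-of-code-2018 | 2017/12/09/part_1.py | solve
-- ===== SOURCE A (Python) =====
-- def solve(chars, score):
--     char = chars.pop()
--
--     if char == '<':
--         while char != '>':
--             char = chars.pop()
--
--             if char == '!':
--                 chars.pop()
--
--         return 0
--
--     total_score = score
--
--     while chars[-1] != '}':
--         total_score += solve(chars, score + 1)
--
--         if chars[-1] == ',':
--             chars.pop()
--
--     chars.pop()
--     return total_score
-- ===== SOURCE B (Python) =====
-- def solve(chars, score):
--     # Iterative single-pass state machine instead of recursion; consumes (pops)
--     # exactly the same characters from chars as the recursive original.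
--     char = chars.pop()
--
--     if char == '<':
--         while char != '>':
--             char = chars.pop()
--
--             if char == '!':
--                 chars.pop()
--
--         return 0
--
--     total = score
--     depth = score
--     open_groups = 1
--     just_closed = False
--
--     while open_groups > 0:
--         c = chars.pop()
--
--         if c == '}':
--             open_groups -= 1
--             depth -= 1
--             just_closed = True
--         elif just_closed and c == ',':
--             just_closed = False
--         elif c == '<':
--             while c != '>':
--                 c = chars.pop()
--
--                 if c == '!':
--                     chars.pop()
--
--             just_closed = True
--         else:
--             depth += 1
--             total += depth
--             open_groups += 1
--             just_closed = False
--
--     return total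
-- ===== Notes on version B (the rewrite author's own statement) =====
-- stated objective: alternative
-- what changed: Replaces the recursive-descent parser by an iterative single-pass state machine that keeps an open-group counter, a running depth and a just-closed flag instead of the call stack.
import Mathlib
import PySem

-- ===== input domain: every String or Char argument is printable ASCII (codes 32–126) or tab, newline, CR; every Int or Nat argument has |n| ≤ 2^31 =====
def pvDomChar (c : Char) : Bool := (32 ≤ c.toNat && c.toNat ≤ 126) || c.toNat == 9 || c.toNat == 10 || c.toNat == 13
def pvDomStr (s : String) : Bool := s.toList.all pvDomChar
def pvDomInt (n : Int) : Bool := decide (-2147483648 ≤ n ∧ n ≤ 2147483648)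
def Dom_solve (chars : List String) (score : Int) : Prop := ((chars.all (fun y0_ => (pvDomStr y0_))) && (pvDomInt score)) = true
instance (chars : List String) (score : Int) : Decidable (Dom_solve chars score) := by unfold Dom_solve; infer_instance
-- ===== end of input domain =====

-- Both Pythons pop from the END of `chars`; the ports consume the HEAD of the
-- REVERSED list, which is the same pop sequence step for step.  Both Pythons
-- mutate `chars` (they consume exactly the same elements); the equivalence
-- proved here is about the RETURN value only.
-- B replaces A's recursive descent by an iterative one-pass state machine
-- (open-group counter + running depth + just-closed flag), O(1) extra space.

-- ===== PORT A =====
-- A's inner garbage loop: pops until an unescaped '>', '!' pops one extra char.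
-- The subtype records that at least one element is consumed (for termination).
def pvGarbA : (l : List String) → Option {r : List String // r.length < l.length}
  | [] => none  -- chars.pop() on empty: IndexError
  | c :: rest =>
    if c = ">" then some ⟨rest, by simp⟩
    else if c = "!" then
      match rest with
      | [] => none
      | _ :: r2 =>
        match pvGarbA r2 with
        | none => none
        | some ⟨r, h⟩ => some ⟨r, by simp only [List.length_cons] at *; omega⟩
    else
      match pvGarbA rest with
      | none => none
      | some ⟨r, h⟩ => some ⟨r, by simp only [List.length_cons] at *; omega⟩

-- A's `solve`, with the mutated list threaded explicitly.
-- mode true  = function entry: pop a char, '<' → garbage, else group opener;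
-- mode false = the `while chars[-1] != '}'` loop with accumulator `total`
-- (`score` is the current call's score argument).  `none` = IndexError.
def solveAux : Bool → (l : List String) → Int → Int → Option (Int × {r : List String // r.length < l.length})
  | _, [], _, _ => none
  | true, c :: rest, score, _ =>
    if c = "<" then
      match pvGarbA rest with
      | none => none
      | some ⟨r, h⟩ => some (0, ⟨r, by simp only [List.length_cons]; omega⟩)
    else
      match solveAux false rest score score with
      | none => none
      | some (v, ⟨r, h⟩) => some (v, ⟨r, by simp only [List.length_cons]; omega⟩)
  | false, c :: rest, score, total =>
    if c = "}" then some (total, ⟨rest, by simp⟩)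
    else
      match solveAux true (c :: rest) (score + 1) 0 with
      | none => none
      | some (_, ⟨[], _⟩) => none  -- chars[-1] on empty: IndexError
      | some (v, ⟨c2 :: r2, h⟩) =>
        if c2 = "," then
          match solveAux false r2 score (total + v) with
          | none => none
          | some (v2, ⟨r', h'⟩) => some (v2, ⟨r', by simp only [List.length_cons] at *; omega⟩)
        else
          match solveAux false (c2 :: r2) score (total + v) with
          | none => none
          | some (v2, ⟨r', h'⟩) => some (v2, ⟨r', by simp only [List.length_cons] at *; omega⟩)
termination_by mode l _ _ => (l.length, if mode then 0 else 1)
decreasing_by all_goals (simp only [List.length_cons, reduceIte] at *; first | (apply Prod.Lex.left; omega) | (apply Prod.Lex.right; omega) | omega)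

-- drop the termination bound from the result (value and leftover-free view)
def solveARun (l : List String) (score : Int) : Option Int :=
  match solveAux true l score 0 with
  | some (v, _) => some v
  | none => none

def solve (chars : List String) (score : Int) : Int :=
  (solveARun chars.reverse score).getD 0  -- A raises IndexError on `none`; such inputs are excluded by Pre_solve

-- ===== PORT B =====
-- Source B's inner garbage loop (textually the same loop as in A's source).
def pvGarbB : (l : List String) → Option {r : List String // r.length < l.length}
  | [] => none
  | c :: rest =>
    if c = ">" then some ⟨rest, by simp⟩
    else if c = "!" then
      match rest with
      | [] => none
      | _ :: r2 =>
        match pvGarbB r2 with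
        | none => none
        | some ⟨r, h⟩ => some ⟨r, by simp only [List.length_cons] at *; omega⟩
    else
      match pvGarbB rest with
      | none => none
      | some ⟨r, h⟩ => some ⟨r, by simp only [List.length_cons] at *; omega⟩

-- Source B's `while open_groups > 0` loop: state = (total, depth, open_groups, just_closed).
def loopB : (l : List String) → Int → Int → Nat → Bool → Option Int
  | _, total, _, 0, _ => some total
  | [], _, _, _ + 1, _ => none  -- chars.pop() on empty: IndexError
  | c :: rest, total, depth, n + 1, jc =>
    if c = "}" then loopB rest total (depth - 1) n true
    else if jc ∧ c = "," then loopB rest total depth (n + 1) false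
    else if c = "<" then
      match pvGarbB rest with
      | none => none
      | some ⟨r, _⟩ => loopB r total depth (n + 1) true
    else loopB rest (total + (depth + 1)) (depth + 1) (n + 1 + 1) false
termination_by l _ _ n _ => (l.length, n)
decreasing_by all_goals (simp only [List.length_cons, reduceIte] at *; first | (apply Prod.Lex.left; omega) | (apply Prod.Lex.right; omega) | omega)

def solveBRun (l : List String) (score : Int) : Int :=
  match l with
  | [] => 0  -- chars.pop() on empty raises in Python; outside Pre_solve
  | c :: rest =>
    if c = "<" then 0  -- the garbage scan only mutates chars; Source B returns 0
    else
      match loopB rest score score 1 false with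
      | some v => v
      | none => 0  -- IndexError; outside Pre_solve

def solve_alt (chars : List String) (score : Int) : Int :=
  solveBRun chars.reverse score

-- ===== PRECONDITION & SPEC =====
-- Well-formedness scan for the stream in pop order (= chars.reverse): a single
-- structural pass with a garbage flag, an escape flag, an open-group counter
-- and a just-closed flag; it checks shape only (no scores) and accepts as soon
-- as the first element is complete (A ignores whatever follows it).
def pvScan : List String → Bool → Bool → Nat → Bool → Bool
  | _, false, _, 0, _ => true           -- the element is complete; rest is arbitrary
  | [], _, _, _, _ => false             -- stream exhausted mid-element: IndexError
  | c :: rest, true, esc, n, jc =>      -- inside garbage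
    if esc then pvScan rest true false n jc
    else if c = ">" then pvScan rest false false n true
    else if c = "!" then pvScan rest true true n jc
    else pvScan rest true false n jc
  | c :: rest, false, _, n + 1, jc =>   -- inside n+1 open groups
    if c = "}" then pvScan rest false false n true
    else if jc ∧ c = "," then pvScan rest false false (n + 1) false
    else if c = "<" then pvScan rest true false (n + 1) jc
    else pvScan rest false false (n + 2) false

def pvPre : List String → Bool
  | [] => false                                      -- chars.pop() on empty: IndexError
  | c :: rest =>
    if c = "<" then pvScan rest true false 0 false   -- a garbage element
    else pvScan rest false false 1 false             -- any other char opens a group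

-- Pre_solve = exactly the inputs on which the Python A returns (no IndexError):
-- the stream, read from the end, starts with one well-formed element.
def Pre_solve (chars : List String) (score : Int) : Prop :=
  pvPre chars.reverse = true
instance (chars : List String) (score : Int) : Decidable (Pre_solve chars score) := by
  unfold Pre_solve; infer_instance

def pvWitness_solve : List String × Int := (["}", ">", "a", "<", ",", "}", "{", "{"], 1)

def Spec_solve (chars : List String) (score : Int) (out : Int) : Prop := out = solve_alt chars score
instance (chars : List String) (score : Int) (out : Int) : Decidable (Spec_solve chars score out) := by
  unfold Spec_solve; infer_instance

-- ===== CLAIM (what is proved, stated in full; the proofs are below) =====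
def Claim_equal_solve : Prop := ∀ (chars : List String) (score : Int), Dom_solve chars score → Pre_solve chars score → Spec_solve chars score (solve chars score)

-- ===== LEMMAS AND PROOFS =====

theorem pvGarbB_eq_pvGarbA : ∀ l : List String, pvGarbB l = pvGarbA l := by
  intro l
  induction l using pvGarbA.induct <;>
    (rw [pvGarbB.eq_def, pvGarbA.eq_def]; try simp_all)

-- Soundness of the scan, by strong induction on the length bound k: inside a
-- group (resp. inside garbage), a successful scan means A's parser consumes an
-- element (resp. the garbage tail) and the scan of the leftover still succeeds.
theorem scan_sound (k : Nat) : ∀ l : List String, l.length ≤ k →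
    ((∀ (n : Nat) (jc : Bool), 1 ≤ n → pvScan l true false n jc = true →
       ∃ (g : List String) (hg : g.length < l.length),
         pvGarbA l = some ⟨g, hg⟩ ∧ pvScan g false false n true = true) ∧
     (∀ (n : Nat) (jc : Bool) (score total : Int),
       pvScan l false false (n + 1) jc = true → (jc = true → l.head? ≠ some ",") →
       ∃ (v : Int) (r : List String) (hr : r.length < l.length),
         solveAux false l score total = some (v, ⟨r, hr⟩) ∧
         pvScan r false false n true = true)) := by
  induction k with
  | zero =>
    intro l hl
    have hnil : l = [] := by cases l with | nil => rfl | cons a b => simp at hl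
    subst hnil
    constructor
    · intro n jc hn hs
      cases n with
      | zero => omega
      | succ n => rw [pvScan.eq_def] at hs; simp at hs
    · intro n jc score total hs hjc
      rw [pvScan.eq_def] at hs; simp at hs
  | succ k ih =>
    intro l hl
    constructor
    · -- garbage tail
      intro n jc hn hs
      cases l with
      | nil =>
        cases n with
        | zero => omega
        | succ n => rw [pvScan.eq_def] at hs; simp at hs
      | cons c rest =>
        cases n with
        | zero => omega
        | succ n =>
        simp only [List.length_cons, Nat.add_le_add_iff_right] at hl
        rw [pvScan.eq_def] at hs
        by_cases h1 : c = ">"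
        · subst h1
          simp at hs
          refine ⟨rest, by simp, ?_, hs⟩
          rw [pvGarbA.eq_def]; simp
        · by_cases h2 : c = "!"
          · subst h2
            simp at hs
            cases rest with
            | nil => rw [pvScan.eq_def] at hs; simp at hs
            | cons x r2 =>
              rw [pvScan.eq_def] at hs
              simp at hs
              obtain ⟨g, hg, hga, hsc⟩ :=
                (ih r2 (by simp at hl; omega)).1 (n + 1) jc (by omega) hs
              refine ⟨g, by simp only [List.length_cons] at *; omega, ?_, hsc⟩
              rw [pvGarbA.eq_def]
              simp [hga]
          · simp [h1, h2] at hs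
            obtain ⟨g, hg, hga, hsc⟩ := (ih rest hl).1 (n + 1) jc (by omega) hs
            refine ⟨g, by simp only [List.length_cons] at *; omega, ?_, hsc⟩
            rw [pvGarbA.eq_def]
            simp [h1, h2, hga]
    · -- group body
      intro n jc score total hs hjc
      cases l with
      | nil => rw [pvScan.eq_def] at hs; simp at hs
      | cons c rest =>
        simp only [List.length_cons, Nat.add_le_add_iff_right] at hl
        rw [pvScan.eq_def] at hs
        rw [solveAux.eq_def]
        by_cases hcb : c = "}"
        · subst hcb
          simp only [reduceIte] at hs ⊢
          exact ⟨total, rest, by simp, rfl, hs⟩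
        · have hsep : ¬ ((jc = true) ∧ c = ",") := by
            rintro ⟨hj, e⟩; exact hjc hj (by simp [e])
          simp only [if_neg hcb, if_neg hsep] at hs ⊢
          by_cases hlt : c = "<"
          · subst hlt
            simp only [reduceIte] at hs ⊢
            obtain ⟨g, hg, hga, hsc⟩ := (ih rest hl).1 (n + 1) jc (by omega) hs
            have helem : solveAux true ("<" :: rest) (score + 1) 0 =
                some (0, ⟨g, by simp only [List.length_cons]; omega⟩) := by
              rw [solveAux.eq_def]
              simp [hga]
            rw [helem]
            cases g with
            | nil => rw [pvScan.eq_def] at hsc; simp at hsc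
            | cons c2 g2 =>
              by_cases hc2 : c2 = ","
              · subst hc2
                rw [pvScan.eq_def] at hsc
                simp at hsc
                simp only [reduceIte]
                obtain ⟨v2, r, hr, hp, hsr⟩ :=
                  (ih g2 (by simp only [List.length_cons] at hg; omega)).2 n false
                    score (total + 0) hsc (by simp)
                rw [hp]
                exact ⟨v2, r, by have ha := hr; have hb := hg; simp only [List.length_cons] at ha hb ⊢; omega, rfl, hsr⟩
              · simp only [if_neg hc2]
                obtain ⟨v2, r, hr, hp, hsr⟩ :=
                  (ih (c2 :: g2) (by have hb := hg; simp only [List.length_cons] at hb ⊢; omega)).2 n true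
                    score (total + 0) hsc (by intro _; simp [hc2])
                rw [hp]
                exact ⟨v2, r, by have ha := hr; have hb := hg; simp only [List.length_cons] at ha hb ⊢; omega, rfl, hsr⟩
          · simp only [if_neg hlt] at hs ⊢
            obtain ⟨v1, r1, hr1, hp1, hs1⟩ := (ih rest hl).2 (n + 1) false
              (score + 1) (score + 1) hs (by simp)
            have helem : solveAux true (c :: rest) (score + 1) 0 =
                some (v1, ⟨r1, by simp only [List.length_cons]; omega⟩) := by
              rw [solveAux.eq_def]
              simp [hlt, hp1]
            rw [helem]
            cases r1 with
            | nil => rw [pvScan.eq_def] at hs1; simp at hs1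
            | cons c2 g2 =>
              by_cases hc2 : c2 = ","
              · subst hc2
                rw [pvScan.eq_def] at hs1
                simp at hs1
                simp only [reduceIte]
                obtain ⟨v2, r, hr, hp, hsr⟩ :=
                  (ih g2 (by simp only [List.length_cons] at hr1; omega)).2 n false
                    score (total + v1) hs1 (by simp)
                rw [hp]
                exact ⟨v2, r, by have ha := hr; have hb := hr1; simp only [List.length_cons] at ha hb ⊢; omega, rfl, hsr⟩
              · simp only [if_neg hc2]
                obtain ⟨v2, r, hr, hp, hsr⟩ :=
                  (ih (c2 :: g2) (by have hb := hr1; simp only [List.length_cons] at hb ⊢; omega)).2 n true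
                    score (total + v1) hs1 (by intro _; simp [hc2])
                rw [hp]
                exact ⟨v2, r, by have ha := hr; have hb := hr1; simp only [List.length_cons] at ha hb ⊢; omega, rfl, hsr⟩

theorem scanBody_sound (l : List String) (n : Nat) (jc : Bool)
    (hs : pvScan l false false (n + 1) jc = true)
    (hjc : jc = true → l.head? ≠ some ",") (score total : Int) :
    ∃ (v : Int) (r : List String) (hr : r.length < l.length),
      solveAux false l score total = some (v, ⟨r, hr⟩) ∧
      pvScan r false false n true = true :=
  (scan_sound l.length l le_rfl).2 n jc score total hs hjc

-- Simulation: B's iterative loop tracks A's recursion.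
-- sim_elem: consuming one A-element (parsed at score = ambient depth + 1) adds
-- that element's A-value to B's running total and sets just_closed, leaving
-- depth and the open counter unchanged.
-- sim_body: consuming the rest of a group body (A's while loop at `score`)
-- adds (v - total) to B's running total, closes one group (depth - 1), and
-- decrements the open counter.
mutual

theorem sim_elem (l : List String) (score v : Int) (r : List String) (h : r.length < l.length)
    (hA : solveAux true l score 0 = some (v, ⟨r, h⟩)) (tB : Int) (n : Nat) (jc : Bool)
    (hjc : jc = true → l.head? ≠ some ",") (hbr : l.head? ≠ some "}") :
    loopB l tB (score - 1) (n + 1) jc = loopB r (tB + v) (score - 1) (n + 1) true := by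
  match l with
  | [] => rw [solveAux.eq_def] at hA; simp at hA
  | c :: rest =>
    rw [solveAux.eq_def] at hA
    by_cases hlt : c = "<"
    · subst hlt
      simp only [reduceIte] at hA
      cases hg : pvGarbA rest with
      | none => rw [hg] at hA; simp at hA
      | some g =>
        obtain ⟨g, hgl⟩ := g
        rw [hg] at hA
        simp only [Option.some.injEq, Prod.mk.injEq, Subtype.mk.injEq] at hA
        obtain ⟨hv, hr⟩ := hA
        rw [← hv, ← hr]
        rw [loopB.eq_def]
        simp only [reduceIte, String.reduceEq, and_false, decide_false, Bool.false_eq_true,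
          false_and, if_false]
        rw [pvGarbB_eq_pvGarbA, hg]
        have e : tB + 0 = tB := by ring
        rw [e]
    · have hcb : ¬ c = "}" := by
        intro e; exact hbr (by simp [e])
      have hsep : ¬ ((jc = true) ∧ c = ",") := by
        rintro ⟨hj, e⟩; exact hjc hj (by simp [e])
      simp only [if_neg hlt] at hA
      cases hb : solveAux false rest score score with
      | none => rw [hb] at hA; simp at hA
      | some p =>
        obtain ⟨v1, r1, h1⟩ := p
        rw [hb] at hA
        simp only [Option.some.injEq, Prod.mk.injEq, Subtype.mk.injEq] at hA
        obtain ⟨hv, hr⟩ := hA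
        rw [← hv, ← hr]
        rw [loopB.eq_def]
        simp only [if_neg hcb, if_neg hsep, if_neg hlt]
        have e1 : score - 1 + 1 = score := by ring
        rw [e1]
        have hs := sim_body rest score score v1 r1 h1 hb (tB + score) (n + 1) false (by simp)
        rw [hs]
        have e2 : tB + score + (v1 - score) = tB + v1 := by ring
        rw [e2]
termination_by 2 * l.length
decreasing_by all_goals ((try simp only [List.length_cons] at *); omega)

theorem sim_body (l : List String) (score total v : Int) (r : List String) (h : r.length < l.length)
    (hA : solveAux false l score total = some (v, ⟨r, h⟩)) (tB : Int) (n : Nat) (jc : Bool)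
    (hjc : jc = true → l.head? ≠ some ",") :
    loopB l tB score (n + 1) jc = loopB r (tB + (v - total)) (score - 1) n true := by
  match l with
  | [] => rw [solveAux.eq_def] at hA; simp at hA
  | c :: rest =>
    rw [solveAux.eq_def] at hA
    by_cases hcb : c = "}"
    · subst hcb
      simp only [reduceIte] at hA
      simp only [Option.some.injEq, Prod.mk.injEq, Subtype.mk.injEq] at hA
      obtain ⟨hv, hr⟩ := hA
      rw [← hv, ← hr]
      rw [loopB.eq_def]
      simp only [reduceIte]
      have e : tB + (total - total) = tB := by ring
      rw [e]
    · simp only [if_neg hcb] at hA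
      cases he : solveAux true (c :: rest) (score + 1) 0 with
      | none => rw [he] at hA; simp at hA
      | some p =>
        obtain ⟨v1, r1, h1⟩ := p
        rw [he] at hA
        cases r1 with
        | nil => simp at hA
        | cons c2 r2 =>
          have hkey : r2.length < rest.length := by
            have h' := h1; simp only [List.length_cons] at h'; omega
          have hE := sim_elem (c :: rest) (score + 1) v1 (c2 :: r2) h1 he tB n jc
            hjc (by simp [hcb])
          have e1 : score + 1 - 1 = score := by ring
          rw [e1] at hE
          rw [hE]
          by_cases hsep : c2 = ","
          · subst hsep
            simp only [reduceIte] at hA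
            cases hb2 : solveAux false r2 score (total + v1) with
            | none => rw [hb2] at hA; simp at hA
            | some p2 =>
              obtain ⟨v2, r2', h2⟩ := p2
              rw [hb2] at hA
              simp only [Option.some.injEq, Prod.mk.injEq, Subtype.mk.injEq] at hA
              obtain ⟨hv, hr⟩ := hA
              rw [← hv, ← hr]
              rw [loopB.eq_def]
              simp only [reduceIte, String.reduceEq, and_true, decide_true, if_true]
              have hs := sim_body r2 score (total + v1) v2 r2' h2 hb2 (tB + v1) n false (by simp)
              rw [hs]
              have e2 : tB + v1 + (v2 - (total + v1)) = tB + (v2 - total) := by ring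
              rw [e2]
          · simp only [if_neg hsep] at hA
            cases hb2 : solveAux false (c2 :: r2) score (total + v1) with
            | none => rw [hb2] at hA; simp at hA
            | some p2 =>
              obtain ⟨v2, r2', h2⟩ := p2
              rw [hb2] at hA
              simp only [Option.some.injEq, Prod.mk.injEq, Subtype.mk.injEq] at hA
              obtain ⟨hv, hr⟩ := hA
              rw [← hv, ← hr]
              have hs := sim_body (c2 :: r2) score (total + v1) v2 r2' h2 hb2 (tB + v1) n true
                (by intro _; simp [hsep])
              rw [hs]
              have e2 : tB + v1 + (v2 - (total + v1)) = tB + (v2 - total) := by ring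
              rw [e2]
termination_by 2 * l.length + 1
decreasing_by all_goals ((try simp only [List.length_cons] at *); omega)

end

-- Assembly on the reversed stream.
theorem main_eq (l : List String) (score : Int) (hpre : pvPre l = true) :
    (solveARun l score).getD 0 = solveBRun l score := by
  unfold solveARun solveBRun
  match l with
  | [] => rw [pvPre.eq_def] at hpre; simp at hpre
  | c :: rest =>
    rw [pvPre.eq_def] at hpre
    by_cases hlt : c = "<"
    · subst hlt
      simp only [reduceIte]
      rw [solveAux.eq_def]
      simp only [reduceIte]
      cases hg : pvGarbA rest with
      | none => simp
      | some g => simp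
    · simp only [if_neg hlt] at hpre ⊢
      obtain ⟨v1, r1, hr1, hp1, _⟩ := scanBody_sound rest 0 false hpre (by simp) score score
      have helem : solveAux true (c :: rest) score 0 =
          some (v1, ⟨r1, by simp only [List.length_cons]; omega⟩) := by
        rw [solveAux.eq_def]; simp [hlt, hp1]
      rw [helem]
      have hs := sim_body rest score score v1 r1 hr1 hp1 score 0 false (by simp)
      rw [hs]
      rw [loopB.eq_def]
      have e : score + (v1 - score) = v1 := by ring
      rw [e]
      rfl

-- ===== VERDICT (by name: the statement is the Claim_ definition above) =====
theorem solve_spec : Claim_equal_solve := by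
  intro chars score _ hpre
  unfold Spec_solve
  unfold Pre_solve at hpre
  unfold solve solve_alt
  exact main_eq chars.reverse score hpre
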